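-- pv_equiv track=rewrite | github.com/lauraaconcari/FDS_FinalProject | Project/processing.py | categorize_genre
-- ===== SOURCE A (Python) =====
-- def categorize_genre(genre):
--     rock_keywords = ['rock']
--     hip_hop_keywords = ['rap', 'hip hop']
--     classic_keywords = ['classical', 'orchestra', 'opera', 'symphony']
--     techno_keywords = ['techno', 'electronic', 'house']
--     reggaeton_keywords = ['reggaeton', 'dembow', 'latin', 'perreo','spanish','raggae']
--     genre_lower = [g.lower() for g in genre]
--
--     if any(keyword in genre_lower for keyword in rock_keywords):
--         return 'Erika'
--     elif any(keyword in genre_lower for keyword in hip_hop_keywords):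
--         return 'Giuliana'
--     elif any(keyword in genre_lower for keyword in classic_keywords):
--         return 'Laura'
--     elif any(keyword in genre_lower for keyword in techno_keywords):
--         return 'Andrea'
--     elif any(keyword in genre_lower for keyword in reggaeton_keywords):
--         return 'Gianluca'
--     else:
--         return 'other'
-- ===== SOURCE B (Python) =====
-- _GENRE_INDEX = {
--     'rock': (0, 'Erika'),
--     'rap': (1, 'Giuliana'), 'hip hop': (1, 'Giuliana'),
--     'classical': (2, 'Laura'), 'orchestra': (2, 'Laura'),
--     'opera': (2, 'Laura'), 'symphony': (2, 'Laura'),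
--     'techno': (3, 'Andrea'), 'electronic': (3, 'Andrea'), 'house': (3, 'Andrea'),
--     'reggaeton': (4, 'Gianluca'), 'dembow': (4, 'Gianluca'), 'latin': (4, 'Gianluca'),
--     'perreo': (4, 'Gianluca'), 'spanish': (4, 'Gianluca'), 'raggae': (4, 'Gianluca'),
-- }
--
-- def categorize_genre(genre):
--     best = None
--     for g in genre:
--         hit = _GENRE_INDEX.get(g.lower())
--         if hit is not None and (best is None or hit[0] < best[0]):
--             best = hit
--     return best[1] if best is not None else 'other'
-- ===== Notes on version B (the rewrite author's own statement) =====
-- stated objective: faster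
-- what changed: Replaces five sequential any/membership scans over the lowered list with one precomputed keyword->(rank,name) index and a single pass that keeps the minimum-rank hit.
import Mathlib
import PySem

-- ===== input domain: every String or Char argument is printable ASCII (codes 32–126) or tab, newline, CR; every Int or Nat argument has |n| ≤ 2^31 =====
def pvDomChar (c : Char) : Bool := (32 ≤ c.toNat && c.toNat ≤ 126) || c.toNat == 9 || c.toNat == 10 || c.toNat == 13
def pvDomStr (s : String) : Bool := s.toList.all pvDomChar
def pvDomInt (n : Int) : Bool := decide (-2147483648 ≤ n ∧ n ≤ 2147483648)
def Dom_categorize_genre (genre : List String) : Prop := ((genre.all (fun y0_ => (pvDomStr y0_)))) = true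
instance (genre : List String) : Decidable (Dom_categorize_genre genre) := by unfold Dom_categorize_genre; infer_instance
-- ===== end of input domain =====

-- B replaces A's five sequential membership scans with one precomputed keyword->(rank,name) index
-- and a single pass keeping the minimum-rank hit (objective: faster; one pass instead of five scans).

-- ===== PORT A =====
def categorize_genre (genre : List String) : String :=
  let rock_keywords : List String := ["rock"]
  let hip_hop_keywords : List String := ["rap", "hip hop"]
  let classic_keywords : List String := ["classical", "orchestra", "opera", "symphony"]
  let techno_keywords : List String := ["techno", "electronic", "house"]
  let reggaeton_keywords : List String := ["reggaeton", "dembow", "latin", "perreo", "spanish", "raggae"]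
  let genre_lower := genre.map PySem.Str.lower
  if rock_keywords.any (fun k => genre_lower.contains k) then "Erika"
  else if hip_hop_keywords.any (fun k => genre_lower.contains k) then "Giuliana"
  else if classic_keywords.any (fun k => genre_lower.contains k) then "Laura"
  else if techno_keywords.any (fun k => genre_lower.contains k) then "Andrea"
  else if reggaeton_keywords.any (fun k => genre_lower.contains k) then "Gianluca"
  else "other"

-- ===== PORT B =====
def pvGenreIndex : PySem.Dict String (Int × String) := PySem.Dict.ofList
  [("rock", (0, "Erika")),
   ("rap", (1, "Giuliana")), ("hip hop", (1, "Giuliana")),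
   ("classical", (2, "Laura")), ("orchestra", (2, "Laura")), ("opera", (2, "Laura")), ("symphony", (2, "Laura")),
   ("techno", (3, "Andrea")), ("electronic", (3, "Andrea")), ("house", (3, "Andrea")),
   ("reggaeton", (4, "Gianluca")), ("dembow", (4, "Gianluca")), ("latin", (4, "Gianluca")),
   ("perreo", (4, "Gianluca")), ("spanish", (4, "Gianluca")), ("raggae", (4, "Gianluca"))]

def categorize_genre_alt (genre : List String) : String :=
  let best := genre.foldl (fun best g =>
    match pvGenreIndex.get? (PySem.Str.lower g) with
    | none => best
    | some hit =>
      match best with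
      | none => some hit
      | some b => if hit.1 < b.1 then some hit else best) none
  match best with
  | some b => b.2
  | none => "other"

-- ===== PRECONDITION & SPEC =====
def Spec_categorize_genre (genre : List String) (out : String) : Prop := out = categorize_genre_alt genre
instance (genre : List String) (out : String) : Decidable (Spec_categorize_genre genre out) := by unfold Spec_categorize_genre; infer_instance

-- ===== CLAIM (what is proved, stated in full; the proofs are below) =====
def Claim_equal_categorize_genre : Prop := ∀ (genre : List String), Dom_categorize_genre genre → Spec_categorize_genre genre (categorize_genre genre)

-- ===== LEMMAS AND PROOFS =====

-- B's loop body as a binary merge (left argument = accumulator, right = the new hit)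
def pvMerge (s o : Option (Int × String)) : Option (Int × String) :=
  match o with
  | none => s
  | some hit =>
    match s with
    | none => some hit
    | some b => if hit.1 < b.1 then some hit else s

def pvStep (s : Option (Int × String)) (g : String) : Option (Int × String) :=
  match pvGenreIndex.get? (PySem.Str.lower g) with
  | none => s
  | some hit =>
    match s with
    | none => some hit
    | some b => if hit.1 < b.1 then some hit else s

lemma pvStep_eq_merge (s : Option (Int × String)) (g : String) :
    pvStep s g = pvMerge s (pvGenreIndex.get? (PySem.Str.lower g)) := by
  unfold pvStep pvMerge
  cases pvGenreIndex.get? (PySem.Str.lower g) <;> rfl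

lemma pvMerge_none (o : Option (Int × String)) : pvMerge none o = o := by
  cases o <;> rfl

lemma pvMerge_assoc (a b c : Option (Int × String)) :
    pvMerge (pvMerge a b) c = pvMerge a (pvMerge b c) := by
  cases a <;> cases b <;> cases c <;>
    simp only [pvMerge] <;>
    (try split_ifs) <;> (try simp only [pvMerge]) <;> (try split_ifs) <;> first | rfl | omega

lemma pvFold_merge (l : List String) (s : Option (Int × String)) :
    l.foldl pvStep s = pvMerge s (l.foldl pvStep none) := by
  induction l generalizing s with
  | nil => rfl
  | cons g t ih =>
    simp only [List.foldl_cons]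
    rw [ih (pvStep s g), ih (pvStep none g), pvStep_eq_merge s g, pvStep_eq_merge none g,
      pvMerge_none, pvMerge_assoc]

-- the fold outcome as a function of which categories matched
def pvBest (b0 b1 b2 b3 b4 : Bool) : Option (Int × String) :=
  if b0 then some (0, "Erika")
  else if b1 then some (1, "Giuliana")
  else if b2 then some (2, "Laura")
  else if b3 then some (3, "Andrea")
  else if b4 then some (4, "Gianluca")
  else none

lemma pvIdx_mk : pvGenreIndex = PySem.Dict.mk
  [("rock", (0, "Erika")),
   ("rap", (1, "Giuliana")), ("hip hop", (1, "Giuliana")),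
   ("classical", (2, "Laura")), ("orchestra", (2, "Laura")), ("opera", (2, "Laura")), ("symphony", (2, "Laura")),
   ("techno", (3, "Andrea")), ("electronic", (3, "Andrea")), ("house", (3, "Andrea")),
   ("reggaeton", (4, "Gianluca")), ("dembow", (4, "Gianluca")), ("latin", (4, "Gianluca")),
   ("perreo", (4, "Gianluca")), ("spanish", (4, "Gianluca")), ("raggae", (4, "Gianluca"))] := by decide

lemma pvLk_cases (s : String) : pvGenreIndex.get? s =
    (if s = "rock" then some ((0 : Int), "Erika")
     else if s = "rap" ∨ s = "hip hop" then some (1, "Giuliana")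
     else if s = "classical" ∨ s = "orchestra" ∨ s = "opera" ∨ s = "symphony" then some (2, "Laura")
     else if s = "techno" ∨ s = "electronic" ∨ s = "house" then some (3, "Andrea")
     else if s = "reggaeton" ∨ s = "dembow" ∨ s = "latin" ∨ s = "perreo" ∨ s = "spanish" ∨ s = "raggae" then some (4, "Gianluca")
     else none) := by
  rw [pvIdx_mk]
  rcases eq_or_ne s "rock" with h|h0
  · subst h; decide
  rcases eq_or_ne s "rap" with h|h1
  · subst h; decide
  rcases eq_or_ne s "hip hop" with h|h2
  · subst h; decide
  rcases eq_or_ne s "classical" with h|h3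
  · subst h; decide
  rcases eq_or_ne s "orchestra" with h|h4
  · subst h; decide
  rcases eq_or_ne s "opera" with h|h5
  · subst h; decide
  rcases eq_or_ne s "symphony" with h|h6
  · subst h; decide
  rcases eq_or_ne s "techno" with h|h7
  · subst h; decide
  rcases eq_or_ne s "electronic" with h|h8
  · subst h; decide
  rcases eq_or_ne s "house" with h|h9
  · subst h; decide
  rcases eq_or_ne s "reggaeton" with h|h10
  · subst h; decide
  rcases eq_or_ne s "dembow" with h|h11
  · subst h; decide
  rcases eq_or_ne s "latin" with h|h12
  · subst h; decide
  rcases eq_or_ne s "perreo" with h|h13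
  · subst h; decide
  rcases eq_or_ne s "spanish" with h|h14
  · subst h; decide
  rcases eq_or_ne s "raggae" with h|h15
  · subst h; decide
  simp [PySem.Dict.get?_mk_cons, PySem.Dict.get?, beq_iff_eq, h0, h1, h2, h3, h4, h5, h6, h7, h8, h9, h10, h11, h12, h13, h14, h15, Ne.symm h0, Ne.symm h1, Ne.symm h2, Ne.symm h3, Ne.symm h4, Ne.symm h5, Ne.symm h6, Ne.symm h7, Ne.symm h8, Ne.symm h9, Ne.symm h10, Ne.symm h11, Ne.symm h12, Ne.symm h13, Ne.symm h14, Ne.symm h15]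

lemma pvM0 (x0 x1 x2 x3 x4 : Bool) :
    pvMerge (some ((0 : Int), "Erika")) (pvBest x0 x1 x2 x3 x4) = pvBest true x1 x2 x3 x4 := by
  cases x0 <;> cases x1 <;> cases x2 <;> cases x3 <;> cases x4 <;> rfl

lemma pvM1 (x0 x1 x2 x3 x4 : Bool) :
    pvMerge (some ((1 : Int), "Giuliana")) (pvBest x0 x1 x2 x3 x4) = pvBest x0 true x2 x3 x4 := by
  cases x0 <;> cases x1 <;> cases x2 <;> cases x3 <;> cases x4 <;> rfl

lemma pvM2 (x0 x1 x2 x3 x4 : Bool) :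
    pvMerge (some ((2 : Int), "Laura")) (pvBest x0 x1 x2 x3 x4) = pvBest x0 x1 true x3 x4 := by
  cases x0 <;> cases x1 <;> cases x2 <;> cases x3 <;> cases x4 <;> rfl

lemma pvM3 (x0 x1 x2 x3 x4 : Bool) :
    pvMerge (some ((3 : Int), "Andrea")) (pvBest x0 x1 x2 x3 x4) = pvBest x0 x1 x2 true x4 := by
  cases x0 <;> cases x1 <;> cases x2 <;> cases x3 <;> cases x4 <;> rfl

lemma pvM4 (x0 x1 x2 x3 x4 : Bool) :
    pvMerge (some ((4 : Int), "Gianluca")) (pvBest x0 x1 x2 x3 x4) = pvBest x0 x1 x2 x3 true := by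
  cases x0 <;> cases x1 <;> cases x2 <;> cases x3 <;> cases x4 <;> rfl

lemma pvBestOf_eq (l : List String) :
    l.foldl pvStep none = pvBest
      (l.any (fun g => PySem.Str.lower g == "rock"))
      (l.any (fun g => PySem.Str.lower g == "rap" || PySem.Str.lower g == "hip hop"))
      (l.any (fun g => PySem.Str.lower g == "classical" || PySem.Str.lower g == "orchestra" || PySem.Str.lower g == "opera" || PySem.Str.lower g == "symphony"))
      (l.any (fun g => PySem.Str.lower g == "techno" || PySem.Str.lower g == "electronic" || PySem.Str.lower g == "house"))
      (l.any (fun g => PySem.Str.lower g == "reggaeton" || PySem.Str.lower g == "dembow" || PySem.Str.lower g == "latin" || PySem.Str.lower g == "perreo" || PySem.Str.lower g == "spanish" || PySem.Str.lower g == "raggae")) := by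
  induction l with
  | nil => rfl
  | cons g t ih =>
    simp only [List.foldl_cons, List.any_cons]
    rw [pvFold_merge, pvStep_eq_merge, pvMerge_none, ih, pvLk_cases (PySem.Str.lower g)]
    split_ifs with h0 h1 h2 h3 h4
    · simp [h0, pvM0]
    · rcases h1 with h | h <;> simp [h, h0, pvM1, beq_iff_eq]
    · rcases h2 with h | h | h | h <;> simp [h, pvM2, beq_iff_eq]
    · rcases h3 with h | h | h <;> simp [h, pvM3, beq_iff_eq]
    · rcases h4 with h | h | h | h | h | h <;> simp [h, pvM4, beq_iff_eq]
    · push_neg at h1 h2 h3 h4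
      simp [pvMerge_none, beq_eq_false_iff_ne.mpr h0, beq_eq_false_iff_ne.mpr h1.1, beq_eq_false_iff_ne.mpr h1.2, beq_eq_false_iff_ne.mpr h2.1, beq_eq_false_iff_ne.mpr h2.2.1, beq_eq_false_iff_ne.mpr h2.2.2.1, beq_eq_false_iff_ne.mpr h2.2.2.2, beq_eq_false_iff_ne.mpr h3.1, beq_eq_false_iff_ne.mpr h3.2.1, beq_eq_false_iff_ne.mpr h3.2.2, beq_eq_false_iff_ne.mpr h4.1, beq_eq_false_iff_ne.mpr h4.2.1, beq_eq_false_iff_ne.mpr h4.2.2.1, beq_eq_false_iff_ne.mpr h4.2.2.2.1, beq_eq_false_iff_ne.mpr h4.2.2.2.2.1, beq_eq_false_iff_ne.mpr h4.2.2.2.2.2]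

lemma pvContains_map (l : List String) (a : String) :
    (l.map PySem.Str.lower).contains a = l.any (fun x => PySem.Str.lower x == a) := by
  rw [List.contains_eq_any_beq, List.any_map]
  simp [Function.comp_def, BEq.comm]

lemma pvAny_or (l : List String) (f g : String → Bool) :
    l.any (fun x => f x || g x) = (l.any f || l.any g) := by
  induction l with
  | nil => rfl
  | cons a t ih => cases h : f a <;> cases h' : g a <;> simp [List.any_cons, ih, h, h']

lemma pvRender_best (b0 b1 b2 b3 b4 : Bool) :
    (match pvBest b0 b1 b2 b3 b4 with | some b => b.2 | none => "other") =
      (if b0 then "Erika" else if b1 then "Giuliana" else if b2 then "Laura"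
       else if b3 then "Andrea" else if b4 then "Gianluca" else "other") := by
  cases b0 <;> cases b1 <;> cases b2 <;> cases b3 <;> cases b4 <;> rfl

-- ===== VERDICT (by name: the statement is the Claim_ definition above) =====
theorem categorize_genre_spec : Claim_equal_categorize_genre := by
  intro genre _
  unfold Spec_categorize_genre categorize_genre categorize_genre_alt
  show _ = (match genre.foldl pvStep none with | some b => b.2 | none => "other")
  rw [pvBestOf_eq, pvRender_best]
  simp only [List.any_cons, List.any_nil, Bool.or_false, pvContains_map, pvAny_or]
  simp only [Bool.or_assoc]
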